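-- pv_equiv track=rewrite | github.com/juy4556/PythonAlgorithm | 백준/9205 맥주 마시면서 걸어가기.py | bfs
-- ===== SOURCE A (Python) =====
-- from collections import deque
--
-- def bfs(points):
--     q = deque()
--     q.append(points[0])
--     visited = [0 for _ in range(len(points))]
--     visited[0] = 1
--     while q:
--         x, y = q.popleft()
--         if [x, y] == points[-1]:
--             return 1
--         for i in range(1, len(points)):
--             if not visited[i] and abs(x - points[i][0]) + abs(y - points[i][1]) <= 1000:
--                 q.append(points[i])
--                 visited[i] = 1
--     return 0
-- ===== SOURCE B (Python) =====
-- def bfs(points):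
--     n = len(points)
--     pts = [(x, y) for x, y in points]
--     reach = [False] * n
--     reach[0] = True
--     for _ in range(n):
--         reach = [reach[i]
--                  or any(reach[j]
--                         and abs(pts[i][0] - pts[j][0]) + abs(pts[i][1] - pts[j][1]) <= 1000
--                         for j in range(n))
--                  for i in range(n)]
--     return 1 if reach[n - 1] else 0
-- ===== Notes on version B (the rewrite author's own statement) =====
-- stated objective: alternative
-- what changed: A's value-matching BFS with a deque, visited flags and an early return is replaced by a dense fixed-point iteration: n rounds of boolean relaxation over all index pairs, answering with reach[n-1].
-- outside the precondition, e.g. on bfs([[1, 2], [0], [1, 2]]): A returns 1, B raises ValueError; on bfs([[0, 0], [5000, 5000, 5000]]): A returns 0, B raises ValueError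
import Mathlib
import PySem

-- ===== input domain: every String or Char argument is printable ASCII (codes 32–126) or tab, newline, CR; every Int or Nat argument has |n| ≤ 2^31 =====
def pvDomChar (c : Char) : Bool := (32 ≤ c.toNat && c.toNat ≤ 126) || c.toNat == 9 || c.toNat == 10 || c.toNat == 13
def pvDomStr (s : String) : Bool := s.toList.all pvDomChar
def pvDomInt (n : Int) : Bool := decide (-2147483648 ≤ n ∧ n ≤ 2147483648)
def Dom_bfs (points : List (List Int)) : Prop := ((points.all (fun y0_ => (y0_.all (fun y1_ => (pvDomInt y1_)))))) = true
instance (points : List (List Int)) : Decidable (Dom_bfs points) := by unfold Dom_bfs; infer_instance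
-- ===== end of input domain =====

-- B replaces A's value-matching BFS queue by n rounds of boolean relaxation over all index
-- pairs, answering with reach[n-1] (objective: alternative; not faster).

-- ===== PORT A =====
-- one step of A's inner `for i in range(1, len(points))` loop; state = (queue, visited)
def stepA (points : List (List Int)) (x y : Int) (st : List (List Int) × List Int) (i : Int) :
    List (List Int) × List Int :=
  if PySem.List.pyGetD st.2 i 0 = 0 ∧
      |x - PySem.List.pyGetD (PySem.List.pyGetD points i []) 0 0| +
      |y - PySem.List.pyGetD (PySem.List.pyGetD points i []) 1 0| ≤ 1000 then
    (st.1 ++ [PySem.List.pyGetD points i []], PySem.List.pySetD st.2 i 1)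
  else st

theorem stepA_len (points : List (List Int)) (x y : Int) (st : List (List Int) × List Int)
    (i : Int) : (stepA points x y st i).2.length = st.2.length := by
  unfold stepA; split <;> simp [PySem.List.length_pySetD]

theorem foldA_len (points : List (List Int)) (x y : Int) (l : List Int)
    (st : List (List Int) × List Int) :
    (l.foldl (stepA points x y) st).2.length = st.2.length := by
  induction l generalizing st with
  | nil => rfl
  | cons a l ih => simp only [List.foldl_cons]; rw [ih, stepA_len]

theorem foldA_meas (points : List (List Int)) (x y : Int) (l : List Int)
    (st : List (List Int) × List Int)
    (h : ∀ i ∈ l, 0 ≤ i ∧ i < (st.2.length : Int)) :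
    (l.foldl (stepA points x y) st).1.length + (l.foldl (stepA points x y) st).2.count 0 ≤
      st.1.length + st.2.count 0 := by
  induction l generalizing st with
  | nil => simp
  | cons a l ih =>
    simp only [List.foldl_cons]
    have ha := h a (by simp)
    have hrest : ∀ i ∈ l, 0 ≤ i ∧ i < ((stepA points x y st a).2.length : Int) := by
      intro i hi; rw [stepA_len]; exact h i (by simp [hi])
    refine le_trans (ih _ hrest) ?_
    unfold stepA
    split
    · rename_i hc
      obtain ⟨k, rfl⟩ : ∃ k : Nat, a = (k : Int) := ⟨a.toNat, (Int.toNat_of_nonneg ha.1).symm⟩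
      have hk : k < st.2.length := by exact_mod_cast ha.2
      have h0 : st.2[k] = 0 := by
        have := hc.1
        simpa [List.getD_eq_getElem?_getD, List.getElem?_eq_getElem hk] using this
      have hc0 : (st.2.set k (1:Int)).count 0 + 1 = st.2.count 0 := by
        rw [List.set_eq_take_append_cons_drop]
        simp only [hk, if_pos]
        conv_rhs => rw [show st.2 = st.2.take k ++ st.2[k] :: st.2.drop (k+1) by
          rw [List.getElem_cons_drop]; simp [List.take_append_drop]]
        simp [List.count_append, h0]
        omega
      simp
      omega
    · omega

-- A's `while q:` loop; hv is the length invariant the termination measure needs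
def bfsLoop (points : List (List Int)) (q : List (List Int)) (visited : List Int)
    (hv : visited.length = points.length) : Int :=
  match q with
  | [] => 0
  | p :: q' =>
    match p with
    | [x, y] =>
      if PySem.List.pyGet? points (-1) = some [x, y] then 1
      else
        bfsLoop points
          ((PySem.List.pyRange 1 (PySem.List.len points) 1).foldl (stepA points x y) (q', visited)).1
          ((PySem.List.pyRange 1 (PySem.List.len points) 1).foldl (stepA points x y) (q', visited)).2
          (by rw [foldA_len]; exact hv)
    | _ => 0
termination_by q.length + visited.count 0
decreasing_by
  have h : ∀ i ∈ PySem.List.pyRange 1 (PySem.List.len points) 1,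
      0 ≤ i ∧ i < ((visited : List Int).length : Int) := by
    intro i hi
    rw [PySem.List.mem_pyRange_one] at hi
    simp [PySem.List.len_eq] at hi
    omega
  have := foldA_meas points x y (PySem.List.pyRange 1 (PySem.List.len points) 1) (q', visited) h
  simp at this ⊢
  omega

def bfs (points : List (List Int)) : Int :=
  bfsLoop points [PySem.List.pyGetD points 0 []]
    (PySem.List.pySetD (List.replicate points.length 0) 0 1)
    (by simp [PySem.List.length_pySetD])

-- ===== PORT B =====
-- the tuple built by Source B's "(x, y) for x, y in points" (unpacking raises outside Pre_)
def pairOf (p : List Int) : Int × Int :=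
  match p with
  | [x, y] => (x, y)
  | _ => (0, 0)

-- Manhattan distance, Source B's abs(pts[i][0]-pts[j][0]) + abs(pts[i][1]-pts[j][1])
def manh2 (a b : Int × Int) : Int := |a.1 - b.1| + |a.2 - b.2|

-- one relaxation sweep: the list comprehension in Source B
def sweep (pts : List (Int × Int)) (n : Nat) (r : List Bool) : List Bool :=
  (List.range n).map (fun i =>
    r.getD i false ||
    (List.range n).any (fun j =>
      r.getD j false && decide (manh2 (pts.getD i (0, 0)) (pts.getD j (0, 0)) ≤ 1000)))

def bfs_alt (points : List (List Int)) : Int :=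
  let n := points.length
  let pts := points.map pairOf
  let reach := (List.range n).foldl (fun r _ => sweep pts n r)
    (PySem.List.pySetD (List.replicate n false) 0 true)
  if PySem.List.pyGetD reach ((n : Int) - 1) false then 1 else 0

-- ===== PRECONDITION & SPEC =====
-- Pre_ excludes the empty list (A raises IndexError on points[0]) and lists containing a
-- malformed point of length ≠ 2, on which A raises (unpacking or indexing) except when the
-- first point already equals the last; B indexes p[0], p[1] and raises on short points.
def Pre_bfs (points : List (List Int)) : Prop :=
  points ≠ [] ∧ ∀ p ∈ points, p.length = 2
instance (points : List (List Int)) : Decidable (Pre_bfs points) := by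
  unfold Pre_bfs; infer_instance

def pvWitness_bfs : List (List Int) := [[0, 0], [500, 500]]

def Spec_bfs (points : List (List Int)) (out : Int) : Prop := out = bfs_alt points
instance (points : List (List Int)) (out : Int) : Decidable (Spec_bfs points out) := by
  unfold Spec_bfs; infer_instance

-- ===== CLAIM (what is proved, stated in full; the proofs are below) =====
def Claim_equal_bfs : Prop :=
  ∀ (points : List (List Int)), Dom_bfs points → Pre_bfs points → Spec_bfs points (bfs points)

-- ===== LEMMAS AND PROOFS =====

-- used by the A-side proofs to state distances between raw points
def manh (p q : List Int) : Int :=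
  |p.getD 0 0 - q.getD 0 0| + |p.getD 1 0 - q.getD 1 0|

-- reachability in the "Manhattan distance ≤ 1000" graph on indices, starting from index 0
inductive Reach (P : List (List Int)) : Nat → Prop
  | zero : Reach P 0
  | step {i j : Nat} : Reach P i → j < P.length →
      manh (P.getD i []) (P.getD j []) ≤ 1000 → Reach P j

theorem manh_comm (p q : List Int) : manh p q = manh q p := by
  simp only [manh, abs_sub_comm]

theorem manh_self (p : List Int) : manh p p = 0 := by simp [manh]

theorem reach_lt {P : List (List Int)} (h0 : 0 < P.length) {i : Nat} (h : Reach P i) :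
    i < P.length := by
  induction h with
  | zero => exact h0
  | step _ hj _ => exact hj

theorem getD_set_self' (l : List Int) (j : Nat) (h : j < l.length) (v : Int) :
    (l.set j v).getD j 0 = v := by
  simp [List.getD_eq_getElem?_getD, List.getElem?_set_self h]

theorem getD_set_ne' (l : List Int) (j k : Nat) (h : j ≠ k) (v : Int) :
    (l.set j v).getD k 0 = l.getD k 0 := by
  simp [List.getD_eq_getElem?_getD, List.getElem?_set_ne h]

theorem getD_set_one (l : List Int) (j k : Nat) (h : l.getD k 0 = 1) :
    (l.set j 1).getD k 0 = 1 := by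
  by_cases hk : k = j
  · subst hk
    by_cases hj : k < l.length
    · rw [getD_set_self' _ _ hj]
    · rw [List.set_eq_of_length_le (le_of_not_gt hj)]; exact h
  · rw [getD_set_ne' _ _ _ (Ne.symm hk)]; exact h

-- the Nat-index form of stepA
def gA (P : List (List Int)) (x y : Int) (st : List (List Int) × List Int) (k : Nat) :
    List (List Int) × List Int :=
  if st.2.getD k 0 = 0 ∧ manh [x, y] (P.getD k []) ≤ 1000 then
    (st.1 ++ [P.getD k []], st.2.set k 1)
  else st

theorem pyGetD_one (xs : List Int) (d : Int) : PySem.List.pyGetD xs (1 : Int) d = xs.getD 1 d := by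
  simpa using PySem.List.pyGetD_natCast xs 1 d

theorem stepA_cast (P : List (List Int)) (x y : Int) (st : List (List Int) × List Int)
    (k : Nat) : stepA P x y st (k : Int) = gA P x y st k := by
  simp [stepA, gA, manh, pyGetD_one, PySem.List.pyGetD_zero]

-- the index list A's inner loop walks, as Nats
def idxL (P : List (List Int)) : List Nat := (List.range (P.length - 1)).map (fun t => 1 + t)

theorem mem_idxL (P : List (List Int)) (k : Nat) :
    k ∈ idxL P ↔ 1 ≤ k ∧ k < P.length := by
  simp only [idxL, List.mem_map, List.mem_range]
  constructor
  · rintro ⟨t, ht, rfl⟩; omega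
  · rintro ⟨h1, h2⟩; exact ⟨k - 1, by omega, by omega⟩

theorem pyfold_eq (P : List (List Int)) (x y : Int) (st : List (List Int) × List Int) :
    (PySem.List.pyRange 1 (PySem.List.len P) 1).foldl (stepA P x y) st =
      (idxL P).foldl (gA P x y) st := by
  rw [PySem.List.pyRange_one, PySem.List.len_eq, List.foldl_map]
  unfold idxL
  rw [List.foldl_map]
  have hr : ((P.length : Int) - 1).toNat = P.length - 1 := by omega
  rw [hr]
  congr 1
  funext st t
  rw [show ((1 : Int) + (t : Int)) = (((1 + t : Nat) : Int)) by push_cast; ring]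
  exact stepA_cast P x y st (1 + t)

theorem gA_len (P : List (List Int)) (x y : Int) (st : List (List Int) × List Int) (k : Nat) :
    (gA P x y st k).2.length = st.2.length := by
  unfold gA; split <;> simp

theorem foldg_mem_q (P : List (List Int)) (x y : Int) (l : List Nat)
    (st : List (List Int) × List Int) (v : List Int) (h : v ∈ st.1) :
    v ∈ (l.foldl (gA P x y) st).1 := by
  induction l generalizing st with
  | nil => exact h
  | cons a l ih =>
    simp only [List.foldl_cons]
    apply ih
    unfold gA; split
    · exact List.mem_append_left _ h
    · exact h

theorem foldg_vis_mono (P : List (List Int)) (x y : Int) (l : List Nat)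
    (st : List (List Int) × List Int) (k : Nat) (h : st.2.getD k 0 = 1) :
    ((l.foldl (gA P x y) st).2).getD k 0 = 1 := by
  induction l generalizing st with
  | nil => exact h
  | cons a l ih =>
    simp only [List.foldl_cons]
    apply ih
    unfold gA; split
    · exact getD_set_one _ _ _ h
    · exact h

theorem gA_01 (P : List (List Int)) (x y : Int) (st : List (List Int) × List Int) (a : Nat)
    (h : ∀ k, st.2.getD k 0 = 0 ∨ st.2.getD k 0 = 1) :
    ∀ k, (gA P x y st a).2.getD k 0 = 0 ∨ (gA P x y st a).2.getD k 0 = 1 := by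
  intro k
  unfold gA; split
  · by_cases hk : k = a
    · subst hk
      by_cases ha : k < st.2.length
      · right; exact getD_set_self' _ _ ha 1
      · rw [List.set_eq_of_length_le (le_of_not_gt ha)]; exact h k
    · rw [getD_set_ne' _ _ _ (Ne.symm hk)]; exact h k
  · exact h k

theorem foldg_01 (P : List (List Int)) (x y : Int) (l : List Nat)
    (st : List (List Int) × List Int)
    (h : ∀ k, st.2.getD k 0 = 0 ∨ st.2.getD k 0 = 1) :
    ∀ k, ((l.foldl (gA P x y) st).2).getD k 0 = 0 ∨
      ((l.foldl (gA P x y) st).2).getD k 0 = 1 := by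
  induction l generalizing st with
  | nil => exact h
  | cons a l ih =>
    simp only [List.foldl_cons]
    exact ih _ (gA_01 P x y st a h)

theorem foldg_origin (P : List (List Int)) (x y : Int) (l : List Nat)
    (st : List (List Int) × List Int)
    (hl : ∀ k ∈ l, k < P.length) (hlen : st.2.length = P.length) (k : Nat)
    (h : ((l.foldl (gA P x y) st).2).getD k 0 = 1) :
    st.2.getD k 0 = 1 ∨ (k < P.length ∧ P.getD k [] ∈ (l.foldl (gA P x y) st).1) := by
  induction l generalizing st with
  | nil => exact Or.inl h
  | cons a l ih =>
    simp only [List.foldl_cons] at h ⊢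
    have ha : a < P.length := hl a (by simp)
    have hrec := ih (gA P x y st a) (fun k hk => hl k (by simp [hk])) (by rw [gA_len]; exact hlen) h
    rcases hrec with h1 | h2
    · unfold gA at h1
      split at h1
      · rename_i hc
        by_cases hk : k = a
        · subst hk
          right
          refine ⟨ha, ?_⟩
          apply foldg_mem_q
          show P.getD k [] ∈ (gA P x y st k).1
          unfold gA
          rw [if_pos hc]
          exact List.mem_append_right _ (List.mem_singleton.mpr rfl)
        · rw [getD_set_ne' _ _ _ (Ne.symm hk)] at h1
          exact Or.inl h1
      · exact Or.inl h1
    · exact Or.inr h2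

theorem foldg_qspec (P : List (List Int)) (x y : Int) (l : List Nat)
    (st : List (List Int) × List Int)
    (hl : ∀ k ∈ l, k < P.length) (hlen : st.2.length = P.length)
    (h : ∀ v ∈ st.1, ∃ k, k < P.length ∧ st.2.getD k 0 = 1 ∧ P.getD k [] = v) :
    ∀ v ∈ (l.foldl (gA P x y) st).1,
      ∃ k, k < P.length ∧ ((l.foldl (gA P x y) st).2).getD k 0 = 1 ∧ P.getD k [] = v := by
  induction l generalizing st with
  | nil => exact h
  | cons a l ih =>
    simp only [List.foldl_cons]
    have ha : a < P.length := hl a (by simp)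
    apply ih (gA P x y st a) (fun k hk => hl k (by simp [hk])) (by rw [gA_len]; exact hlen)
    intro v hv
    unfold gA at hv ⊢
    split at hv
    · rename_i hc
      rw [if_pos hc]
      rcases List.mem_append.mp hv with hv | hv
      · obtain ⟨k, hk, hvis, hval⟩ := h v hv
        exact ⟨k, hk, getD_set_one _ _ _ hvis, hval⟩
      · simp at hv
        subst hv
        exact ⟨a, ha, getD_set_self' _ _ (hlen ▸ ha) 1, rfl⟩
    · rename_i hc
      rw [if_neg hc]
      exact h v hv

theorem foldg_reach (P : List (List Int)) (x y : Int) (l : List Nat)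
    (st : List (List Int) × List Int)
    (hl : ∀ k ∈ l, k < P.length)
    (hsrc : ∃ kp, Reach P kp ∧ P.getD kp [] = [x, y])
    (h : ∀ k, k < P.length → st.2.getD k 0 = 1 → Reach P k) :
    ∀ k, k < P.length → ((l.foldl (gA P x y) st).2).getD k 0 = 1 → Reach P k := by
  induction l generalizing st with
  | nil => exact h
  | cons a l ih =>
    simp only [List.foldl_cons]
    have ha : a < P.length := hl a (by simp)
    apply ih (gA P x y st a) (fun k hk => hl k (by simp [hk]))
    intro k hk hvis
    unfold gA at hvis
    split at hvis
    · rename_i hc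
      by_cases hka : k = a
      · subst hka
        obtain ⟨kp, hr, hval⟩ := hsrc
        exact Reach.step hr hk (by rw [hval]; exact hc.2)
      · rw [getD_set_ne' _ _ _ (Ne.symm hka)] at hvis
        exact h k hk hvis
    · exact h k hk hvis

theorem foldg_cover (P : List (List Int)) (x y : Int) (l : List Nat)
    (st : List (List Int) × List Int)
    (hl : ∀ k ∈ l, k < P.length) (hlen : st.2.length = P.length)
    (h01 : ∀ k, st.2.getD k 0 = 0 ∨ st.2.getD k 0 = 1) :
    ∀ j ∈ l, manh [x, y] (P.getD j []) ≤ 1000 →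
      ((l.foldl (gA P x y) st).2).getD j 0 = 1 := by
  induction l generalizing st with
  | nil => intro j hj; simp at hj
  | cons a l ih =>
    intro j hj hm
    simp only [List.foldl_cons]
    rcases List.mem_cons.mp hj with hj | hj
    · subst hj
      apply foldg_vis_mono
      have ha : j < st.2.length := by rw [hlen]; exact hl j (by simp)
      unfold gA
      split
      · exact getD_set_self' _ _ ha 1
      · rename_i hc
        rcases h01 j with h0 | h1
        · exact absurd ⟨h0, hm⟩ hc
        · exact h1
    · exact ih (gA P x y st a) (fun k hk => hl k (by simp [hk])) (by rw [gA_len]; exact hlen)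
        (gA_01 P x y st a h01) j hj hm

-- the BFS loop invariant
def InvA (P : List (List Int)) (q : List (List Int)) (vis : List Int) : Prop :=
  vis.getD 0 0 = 1 ∧
  (∀ k, vis.getD k 0 = 0 ∨ vis.getD k 0 = 1) ∧
  (∀ k, k < P.length → vis.getD k 0 = 1 → Reach P k) ∧
  (∀ v ∈ q, ∃ k, k < P.length ∧ vis.getD k 0 = 1 ∧ P.getD k [] = v) ∧
  (∀ k, k < P.length → vis.getD k 0 = 1 →
    (P.getD k [] ∈ q ∨ ∀ j, 1 ≤ j → j < P.length →
      manh (P.getD k []) (P.getD j []) ≤ 1000 → vis.getD j 0 = 1)) ∧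
  (vis.getD (P.length - 1) 0 = 1 → P.getD (P.length - 1) [] ∈ q)

theorem getD_mem' (P : List (List Int)) (k : Nat) (h : k < P.length) : P.getD k [] ∈ P := by
  rw [List.getD_eq_getElem _ _ h]; exact List.getElem_mem h

theorem pre_pos {P : List (List Int)} (hP : Pre_bfs P) : 0 < P.length := by
  cases P with
  | nil => exact absurd rfl hP.1
  | cons a t => simp

theorem InvA_preserved (P : List (List Int)) (x y : Int) (q' : List (List Int)) (vis : List Int)
    (hlen : vis.length = P.length)
    (hI : InvA P ([x, y] :: q') vis)
    (hlast : P.getD (P.length - 1) [] ≠ [x, y]) :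
    InvA P ((idxL P).foldl (gA P x y) (q', vis)).1 ((idxL P).foldl (gA P x y) (q', vis)).2 := by
  obtain ⟨h1, h01, hreach, hq, hcl, hlst⟩ := hI
  have hl : ∀ k ∈ idxL P, k < P.length := fun k hk => ((mem_idxL P k).1 hk).2
  obtain ⟨kp, hkp, hkvis, hkval⟩ := hq [x, y] (by simp)
  have hsrc : ∃ kp, Reach P kp ∧ P.getD kp [] = [x, y] := ⟨kp, hreach kp hkp hkvis, hkval⟩
  refine ⟨?_, ?_, ?_, ?_, ?_, ?_⟩
  · exact foldg_vis_mono P x y (idxL P) (q', vis) 0 h1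
  · exact foldg_01 P x y (idxL P) (q', vis) h01
  · exact foldg_reach P x y (idxL P) (q', vis) hl hsrc hreach
  · exact foldg_qspec P x y (idxL P) (q', vis) hl hlen
      (fun v hv => hq v (List.mem_cons_of_mem _ hv))
  · intro k hk hv
    rcases foldg_origin P x y (idxL P) (q', vis) hl hlen k hv with hold | hnew
    · rcases hcl k hk hold with hmem | hclosed
      · rcases List.mem_cons.mp hmem with heq | hmem'
        · right
          intro j hj1 hj2 hadj
          apply foldg_cover P x y (idxL P) (q', vis) hl hlen h01 j
            ((mem_idxL P j).2 ⟨hj1, hj2⟩)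
          rw [heq] at hadj
          exact hadj
        · left; exact foldg_mem_q P x y (idxL P) (q', vis) _ hmem'
      · right
        intro j hj1 hj2 hadj
        exact foldg_vis_mono P x y (idxL P) (q', vis) j (hclosed j hj1 hj2 hadj)
    · left; exact hnew.2
  · intro hv
    rcases foldg_origin P x y (idxL P) (q', vis) hl hlen _ hv with hold | hnew
    · have hm := hlst hold
      rcases List.mem_cons.mp hm with heq | hmem'
      · exact absurd heq hlast
      · exact foldg_mem_q P x y (idxL P) (q', vis) _ hmem'
    · exact hnew.2

theorem not_reach_of_done (P : List (List Int)) (vis : List Int) (hP : Pre_bfs P)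
    (hI : InvA P [] vis) : ¬ Reach P (P.length - 1) := by
  intro hre
  have hn : 0 < P.length := pre_pos hP
  have closed : ∀ k, Reach P k → vis.getD k 0 = 1 := by
    intro k hk
    induction hk with
    | zero => exact hI.1
    | @step i j hki hj hm ihk =>
      by_cases hj0 : j = 0
      · subst hj0; exact hI.1
      · have hi : i < P.length := reach_lt hn hki
        rcases hI.2.2.2.2.1 i hi ihk with hmem | hcl
        · simp at hmem
        · exact hcl j (by omega) hj hm
  have := hI.2.2.2.2.2 (closed _ hre)
  simp at this

theorem bfsLoop_nil (P : List (List Int)) (vis : List Int) (hv : vis.length = P.length) :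
    bfsLoop P [] vis hv = 0 := by
  rw [bfsLoop]

theorem bfsLoop_cons (P : List (List Int)) (x y : Int) (q' : List (List Int)) (vis : List Int)
    (hv : vis.length = P.length) :
    bfsLoop P ([x, y] :: q') vis hv =
      if PySem.List.pyGet? P (-1) = some [x, y] then 1
      else
        bfsLoop P
          ((PySem.List.pyRange 1 (PySem.List.len P) 1).foldl (stepA P x y) (q', vis)).1
          ((PySem.List.pyRange 1 (PySem.List.len P) 1).foldl (stepA P x y) (q', vis)).2
          (by rw [foldA_len]; exact hv) := by
  rw [bfsLoop]

theorem lastval_of_pyGet (P : List (List Int)) (hne : P ≠ []) (v : List Int)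
    (h : PySem.List.pyGet? P (-1) = some v) : P.getD (P.length - 1) [] = v := by
  rw [PySem.List.pyGet?_neg_one] at h
  rw [List.getLast?_eq_getElem?] at h
  have hlt : P.length - 1 < P.length := by
    cases P with
    | nil => exact absurd rfl hne
    | cons a t => simp
  rw [List.getElem?_eq_getElem hlt] at h
  rw [List.getD_eq_getElem _ _ hlt]
  exact Option.some_injective _ h

theorem pyGet_of_lastval (P : List (List Int)) (hne : P ≠ []) :
    PySem.List.pyGet? P (-1) = some (P.getD (P.length - 1) []) := by
  rw [PySem.List.pyGet?_neg_one, List.getLast?_eq_getElem?]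
  have hlt : P.length - 1 < P.length := by
    cases P with
    | nil => exact absurd rfl hne
    | cons a t => simp
  rw [List.getElem?_eq_getElem hlt, List.getD_eq_getElem _ _ hlt]

theorem bfsLoop_correct (P : List (List Int)) (hP : Pre_bfs P) :
    ∀ (N : Nat) (q : List (List Int)) (vis : List Int) (hv : vis.length = P.length),
      q.length + vis.count 0 ≤ N → InvA P q vis →
      (Reach P (P.length - 1) → bfsLoop P q vis hv = 1) ∧
      (¬ Reach P (P.length - 1) → bfsLoop P q vis hv = 0) := by
  intro N
  induction N with
  | zero =>
    intro q vis hv hm hI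
    have hq : q = [] := by
      cases q with
      | nil => rfl
      | cons a t => simp at hm
    subst hq
    exact ⟨fun hre => absurd hre (not_reach_of_done P vis hP hI),
      fun _ => bfsLoop_nil P vis hv⟩
  | succ N ih =>
    intro q vis hv hm hI
    cases q with
    | nil =>
      exact ⟨fun hre => absurd hre (not_reach_of_done P vis hP hI),
        fun _ => bfsLoop_nil P vis hv⟩
    | cons p q' =>
      obtain ⟨k0, hk0, hk0vis, hval⟩ := hI.2.2.2.1 p (by simp)
      have hp2 : p.length = 2 := hP.2 _ (by rw [← hval]; exact getD_mem' P k0 hk0)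
      obtain ⟨x, y, rfl⟩ : ∃ x y, p = [x, y] := by
        match p, hp2 with
        | [x, y], _ => exact ⟨x, y, rfl⟩
      by_cases hc : PySem.List.pyGet? P (-1) = some [x, y]
      · have hn : 0 < P.length := pre_pos hP
        have hlastval : P.getD (P.length - 1) [] = [x, y] :=
          lastval_of_pyGet P hP.1 _ hc
        have hre : Reach P (P.length - 1) := by
          refine Reach.step (hI.2.2.1 k0 hk0 hk0vis) (by omega) ?_
          rw [hval, hlastval, manh_self]
          norm_num
        refine ⟨fun _ => ?_, fun hnr => absurd hre hnr⟩
        rw [bfsLoop_cons, if_pos hc]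
      · have hlast : P.getD (P.length - 1) [] ≠ [x, y] := by
          intro he
          exact hc (he ▸ pyGet_of_lastval P hP.1)
        have hInv2 := InvA_preserved P x y q' vis hv hI hlast
        rw [← pyfold_eq] at hInv2
        have hmeas := foldA_meas P x y (PySem.List.pyRange 1 (PySem.List.len P) 1) (q', vis)
          (by
            intro i hi
            rw [PySem.List.mem_pyRange_one] at hi
            simp only [PySem.List.len_eq] at hi
            constructor
            · omega
            · rw [hv]; omega)
        have hmeas2 : ((PySem.List.pyRange 1 (PySem.List.len P) 1).foldl (stepA P x y)
              (q', vis)).1.length +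
            ((PySem.List.pyRange 1 (PySem.List.len P) 1).foldl (stepA P x y)
              (q', vis)).2.count 0 ≤ q'.length + vis.count 0 := by
          simpa using hmeas
        have hrec := ih _ _ (by rw [foldA_len]; exact hv)
          (by simp only [List.length_cons] at hm; omega) hInv2
        constructor
        · intro hre
          rw [bfsLoop_cons, if_neg hc]
          exact hrec.1 hre
        · intro hnr
          rw [bfsLoop_cons, if_neg hc]
          exact hrec.2 hnr

theorem replicate_getD_zero (m k : Nat) : (List.replicate m (0 : Int)).getD k 0 = 0 := by
  by_cases h : k < m
  · rw [List.getD_eq_getElem _ _ (by simpa using h)]; simp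
  · rw [List.getD_eq_default _ _ (by simpa using le_of_not_gt h)]

theorem vis0_getD (P : List (List Int)) (hne : P ≠ []) (k : Nat) :
    (PySem.List.pySetD (List.replicate P.length (0 : Int)) 0 1).getD k 0 =
      if k = 0 then 1 else 0 := by
  have hset : PySem.List.pySetD (List.replicate P.length (0 : Int)) 0 1 =
      (List.replicate P.length (0 : Int)).set 0 1 := by
    rw [PySem.List.pySetD_of_nonneg _ _ (by norm_num)]
    norm_num
  rw [hset]
  by_cases hk : k = 0
  · subst hk
    rw [if_pos rfl]
    exact getD_set_self' _ _
      (by cases P with | nil => exact absurd rfl hne | cons a t => simp) 1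
  · rw [if_neg hk, getD_set_ne' _ _ _ (Ne.symm hk)]
    exact replicate_getD_zero _ _

theorem bfs_eq_reach (P : List (List Int)) (hP : Pre_bfs P) :
    (Reach P (P.length - 1) → bfs P = 1) ∧ (¬ Reach P (P.length - 1) → bfs P = 0) := by
  have hn : 0 < P.length := pre_pos hP
  have hv0 := vis0_getD P hP.1
  unfold bfs
  apply bfsLoop_correct P hP (1 + P.length)
  · have hc : (PySem.List.pySetD (List.replicate P.length (0 : Int)) 0 1).count 0 ≤
        P.length := by
      calc (PySem.List.pySetD (List.replicate P.length (0 : Int)) 0 1).count 0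
          ≤ (PySem.List.pySetD (List.replicate P.length (0 : Int)) 0 1).length :=
            List.count_le_length
        _ = P.length := by
            rw [PySem.List.length_pySetD]; simp
    simp only [List.length_cons, List.length_nil]
    omega
  · have hq0 : PySem.List.pyGetD P 0 [] = P.getD 0 [] := PySem.List.pyGetD_zero P []
    refine ⟨?_, ?_, ?_, ?_, ?_, ?_⟩
    · rw [hv0 0]; rfl
    · intro k; rw [hv0 k]; split <;> simp
    · intro k hk hvk
      rw [hv0 k] at hvk
      by_cases hk0 : k = 0
      · subst hk0; exact Reach.zero
      · rw [if_neg hk0] at hvk; norm_num at hvk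
    · intro v hv
      simp only [List.mem_singleton] at hv
      subst hv
      exact ⟨0, hn, by rw [hv0 0]; rfl, hq0.symm⟩
    · intro k hk hvk
      rw [hv0 k] at hvk
      by_cases hk0 : k = 0
      · subst hk0
        left
        rw [hq0]
        simp
      · rw [if_neg hk0] at hvk; norm_num at hvk
    · intro hvk
      rw [hv0 _] at hvk
      by_cases hk0 : P.length - 1 = 0
      · rw [hk0, hq0]
        simp
      · rw [if_neg hk0] at hvk; norm_num at hvk

-- ---- B side: the n-fold relaxation computes exactly reachability ----

def iterB (P : List (List Int)) (k : Nat) : List Bool :=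
  (sweep (P.map pairOf) P.length)^[k]
    (PySem.List.pySetD (List.replicate P.length false) 0 true)

theorem foldl_const_iterate {α : Type} (f : α → α) (r : α) (m : Nat) :
    (List.range m).foldl (fun a _ => f a) r = f^[m] r := by
  induction m with
  | zero => rfl
  | succ m ih =>
    rw [List.range_succ, List.foldl_append, ih, List.foldl_cons, List.foldl_nil,
      Function.iterate_succ_apply']

theorem iterB_succ (P : List (List Int)) (k : Nat) :
    iterB P (k + 1) = sweep (P.map pairOf) P.length (iterB P k) := by
  unfold iterB; rw [Function.iterate_succ_apply']

theorem sweep_len (pts : List (Int × Int)) (n : Nat) (r : List Bool) :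
    (sweep pts n r).length = n := by simp [sweep]

theorem iterB_len (P : List (List Int)) (k : Nat) : (iterB P k).length = P.length := by
  induction k with
  | zero => simp [iterB, PySem.List.length_pySetD]
  | succ k ih => rw [iterB_succ, sweep_len]

theorem getD_sweep (pts : List (Int × Int)) (n : Nat) (r : List Bool) (i : Nat) (hi : i < n) :
    (sweep pts n r).getD i false =
      (r.getD i false ||
        (List.range n).any (fun j =>
          r.getD j false && decide (manh2 (pts.getD i (0, 0)) (pts.getD j (0, 0)) ≤ 1000))) := by
  unfold sweep
  rw [List.getD_eq_getElem?_getD, List.getElem?_map, List.getElem?_range hi]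
  rfl

theorem pts_getD (P : List (List Int)) (i : Nat) (hi : i < P.length) :
    (P.map pairOf).getD i (0, 0) = pairOf (P.getD i []) := by
  rw [List.getD_eq_getElem _ _ (by simpa using hi), List.getElem_map,
    List.getD_eq_getElem _ _ hi]

theorem manh_bridge (P : List (List Int)) (hP : Pre_bfs P) (i j : Nat)
    (hi : i < P.length) (hj : j < P.length) :
    manh2 ((P.map pairOf).getD i (0, 0)) ((P.map pairOf).getD j (0, 0)) =
      manh (P.getD i []) (P.getD j []) := by
  rw [pts_getD P i hi, pts_getD P j hj]
  have hpi : (P.getD i []).length = 2 := hP.2 _ (getD_mem' P i hi)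
  have hpj : (P.getD j []).length = 2 := hP.2 _ (getD_mem' P j hj)
  match hpe : P.getD i [], hpi, hpe2 : P.getD j [], hpj with
  | [a, b], _, [c, d], _ => simp [pairOf, manh2, manh]

theorem getD_true_lt (l : List Bool) (i : Nat) (h : l.getD i false = true) : i < l.length := by
  by_contra hc
  rw [List.getD_eq_default _ _ (le_of_not_gt hc)] at h
  simp at h

theorem bgetD_set_self (l : List Bool) (j : Nat) (h : j < l.length) (v : Bool) :
    (l.set j v).getD j false = v := by
  simp [List.getD_eq_getElem?_getD, List.getElem?_set_self h]

theorem bgetD_set_ne (l : List Bool) (j k : Nat) (h : j ≠ k) (v : Bool) :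
    (l.set j v).getD k false = l.getD k false := by
  simp [List.getD_eq_getElem?_getD, List.getElem?_set_ne h]

theorem replicate_getD_false (m k : Nat) : (List.replicate m false).getD k false = false := by
  by_cases h : k < m
  · rw [List.getD_eq_getElem _ _ (by simpa using h)]; simp
  · rw [List.getD_eq_default _ _ (by simpa using le_of_not_gt h)]

theorem r0_getD (P : List (List Int)) (hne : P ≠ []) (k : Nat) :
    (PySem.List.pySetD (List.replicate P.length false) 0 true).getD k false =
      if k = 0 then true else false := by
  have hset : PySem.List.pySetD (List.replicate P.length false) 0 true =
      (List.replicate P.length false).set 0 true := by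
    rw [PySem.List.pySetD_of_nonneg _ _ (by norm_num)]
    norm_num
  rw [hset]
  by_cases hk : k = 0
  · subst hk
    rw [if_pos rfl]
    exact bgetD_set_self _ _
      (by cases P with | nil => exact absurd rfl hne | cons a t => simp) true
  · rw [if_neg hk, bgetD_set_ne _ _ _ (Ne.symm hk)]
    exact replicate_getD_false _ _

theorem iterB_sound (P : List (List Int)) (hP : Pre_bfs P) :
    ∀ (k : Nat) (i : Nat), (iterB P k).getD i false = true → Reach P i := by
  intro k
  induction k with
  | zero =>
    intro i h
    simp only [iterB, Function.iterate_zero_apply] at h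
    rw [r0_getD P hP.1 i] at h
    by_cases hi : i = 0
    · subst hi; exact Reach.zero
    · rw [if_neg hi] at h; simp at h
  | succ k ih =>
    intro i h
    rw [iterB_succ] at h
    have hi : i < P.length := by
      have := getD_true_lt _ _ h
      rwa [sweep_len] at this
    rw [getD_sweep _ _ _ i hi] at h
    simp only [Bool.or_eq_true] at h
    rcases h with h | h
    · exact ih i h
    · rw [List.any_eq_true] at h
      obtain ⟨j, hj, hcond⟩ := h
      rw [List.mem_range] at hj
      rw [Bool.and_eq_true] at hcond
      have hadj := of_decide_eq_true hcond.2
      rw [manh_bridge P hP i j hi hj] at hadj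
      exact Reach.step (ih j hcond.1) hi (by rw [manh_comm]; exact hadj)

theorem sweep_mono_self (pts : List (Int × Int)) (n : Nat) (r : List Bool)
    (hr : r.length = n) (i : Nat) (h : r.getD i false = true) :
    (sweep pts n r).getD i false = true := by
  have hi : i < n := hr ▸ getD_true_lt _ _ h
  rw [getD_sweep pts n r i hi, h]
  simp

theorem iterB_step_mono (P : List (List Int)) (k i : Nat)
    (h : (iterB P k).getD i false = true) : (iterB P (k + 1)).getD i false = true := by
  rw [iterB_succ]
  exact sweep_mono_self _ _ _ (iterB_len P k) i h

theorem iterB_le (P : List (List Int)) (k m : Nat) (h : k ≤ m) (i : Nat)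
    (hk : (iterB P k).getD i false = true) : (iterB P m).getD i false = true := by
  obtain ⟨d, rfl⟩ := Nat.exists_eq_add_of_le h
  induction d with
  | zero => exact hk
  | succ d ihd => rw [← Nat.add_assoc]; exact iterB_step_mono P _ _ (ihd (by omega))

theorem count_le_of_pointwise :
    ∀ (r r' : List Bool), r.length = r'.length →
      (∀ k, r.getD k false = true → r'.getD k false = true) →
      r.count true ≤ r'.count true := by
  intro r
  induction r with
  | nil => intro r' _ _; simp
  | cons a r ih =>
    intro r' hlen hmono
    cases r' with
    | nil => simp at hlen
    | cons a' r' =>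
      have hmono0 : a = true → a' = true := by
        intro ha
        have := hmono 0 (by simpa using ha)
        simpa using this
      have hmonoS : ∀ k, r.getD k false = true → r'.getD k false = true := by
        intro k hk
        have := hmono (k + 1) (by simpa using hk)
        simpa using this
      have htail := ih r' (by simpa using hlen) hmonoS
      have hcc : ∀ (b : Bool) (l : List Bool),
          List.count true (b :: l) = List.count true l + (if b = true then 1 else 0) := by
        intro b l; cases b <;> simp
      have e0 : (if (false : Bool) = true then 1 else 0) = 0 := rfl
      have e1 : (if (true : Bool) = true then 1 else 0) = 1 := rfl
      cases a <;> cases a'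
      · rw [hcc, hcc, e0]; omega
      · rw [hcc, hcc, e0, e1]; omega
      · exact absurd (hmono0 rfl) (by simp)
      · rw [hcc, hcc, e1]; omega

theorem count_lt_of_pointwise :
    ∀ (r r' : List Bool), r.length = r'.length →
      (∀ k, r.getD k false = true → r'.getD k false = true) → r ≠ r' →
      r.count true < r'.count true := by
  intro r
  induction r with
  | nil => intro r' hlen _ hne; cases r' <;> simp_all
  | cons a r ih =>
    intro r' hlen hmono hne
    cases r' with
    | nil => simp at hlen
    | cons a' r' =>
      have hmono0 : a = true → a' = true := by
        intro ha
        have := hmono 0 (by simpa using ha)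
        simpa using this
      have hmonoS : ∀ k, r.getD k false = true → r'.getD k false = true := by
        intro k hk
        have := hmono (k + 1) (by simpa using hk)
        simpa using this
      have hlen' : r.length = r'.length := by simpa using hlen
      by_cases hhead : a = a'
      · subst hhead
        have hne' : r ≠ r' := fun he => hne (by rw [he])
        have := ih r' hlen' hmonoS hne'
        simp only [List.count_cons]
        omega
      · have ha : a = false := by
          by_contra hc
          rw [Bool.not_eq_false] at hc
          exact hhead (by rw [hc, hmono0 hc])
        have ha' : a' = true := by
          cases a' with
          | true => rfl
          | false => exact absurd (ha.trans rfl) hhead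
        have htail := count_le_of_pointwise r r' hlen' hmonoS
        subst ha; subst ha'
        simp
        omega

theorem iterB_count0 (P : List (List Int)) (hne : P ≠ []) :
    (iterB P 0).count true = 1 := by
  cases P with
  | nil => exact absurd rfl hne
  | cons a t =>
    simp only [iterB, Function.iterate_zero_apply]
    rw [show PySem.List.pySetD (List.replicate (a :: t).length false) 0 true =
        (List.replicate (a :: t).length false).set 0 true by
      rw [PySem.List.pySetD_of_nonneg _ _ (by norm_num)]; norm_num]
    simp [List.replicate_succ, List.count_replicate]

theorem iterB_closed (P : List (List Int)) (hP : Pre_bfs P) (i : Nat)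
    (h : (sweep (P.map pairOf) P.length (iterB P P.length)).getD i false = true) :
    (iterB P P.length).getD i false = true := by
  by_cases hfix : ∃ k < P.length, iterB P (k + 1) = iterB P k
  · obtain ⟨k, hk, heq⟩ := hfix
    have hstab : ∀ m, k ≤ m → iterB P m = iterB P k := by
      intro m hm
      induction m with
      | zero => rw [Nat.le_zero.mp hm]
      | succ m ihm =>
        rcases Nat.lt_or_ge k (m + 1) with hlt | hge
        · have hkm : k ≤ m := by omega
          rw [iterB_succ, ihm hkm, ← iterB_succ, heq]
        · have : k = m + 1 := by omega
          rw [this]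
    have h1 : iterB P P.length = iterB P k := hstab _ (le_of_lt hk)
    rw [h1] at h ⊢
    rw [← iterB_succ, heq] at h
    exact h
  · have hfix2 : ∀ k, k < P.length → iterB P (k + 1) ≠ iterB P k := by
      intro k hk he
      exact hfix ⟨k, hk, he⟩
    have grow : ∀ k, k ≤ P.length → k + 1 ≤ (iterB P k).count true := by
      intro k
      induction k with
      | zero => intro _; rw [iterB_count0 P hP.1]
      | succ k ihk =>
        intro hkn
        have hlt := count_lt_of_pointwise (iterB P k) (iterB P (k + 1))
          (by rw [iterB_len, iterB_len])
          (fun j hj => iterB_step_mono P k j hj)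
          (fun he => hfix2 k (by omega) (by rw [he]))
        have := ihk (by omega)
        omega
    have h1 := grow P.length (le_refl _)
    have h2 : (iterB P P.length).count true ≤ P.length := by
      calc (iterB P P.length).count true ≤ (iterB P P.length).length := List.count_le_length
        _ = P.length := iterB_len P _
    omega

theorem iterB_complete (P : List (List Int)) (hP : Pre_bfs P) :
    ∀ i, Reach P i → (iterB P P.length).getD i false = true := by
  intro i hr
  induction hr with
  | zero =>
    apply iterB_le P 0 P.length (Nat.zero_le _)
    simp only [iterB, Function.iterate_zero_apply]
    rw [r0_getD P hP.1 0]
    rfl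
  | @step i j hi hj hm ih =>
    apply iterB_closed P hP j
    rw [getD_sweep _ _ _ j hj]
    simp only [Bool.or_eq_true]
    right
    apply List.any_eq_true.mpr
    have hin : i < P.length := reach_lt (pre_pos hP) hi
    refine ⟨i, List.mem_range.mpr hin, ?_⟩
    rw [Bool.and_eq_true]
    refine ⟨ih, decide_eq_true ?_⟩
    rw [manh_bridge P hP j i hj hin, manh_comm]
    exact hm

theorem bfs_alt_char (P : List (List Int)) (hP : Pre_bfs P) :
    bfs_alt P = if (iterB P P.length).getD (P.length - 1) false then 1 else 0 := by
  have hn : 0 < P.length := pre_pos hP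
  show (if PySem.List.pyGetD ((List.range P.length).foldl
        (fun r _ => sweep (P.map pairOf) P.length r)
        (PySem.List.pySetD (List.replicate P.length false) 0 true))
        ((P.length : Int) - 1) false then (1 : Int) else 0) = _
  rw [foldl_const_iterate (sweep (P.map pairOf) P.length)]
  rw [show ((P.length : Int) - 1) = ((P.length - 1 : Nat) : Int) by omega]
  rw [PySem.List.pyGetD_natCast]
  rfl

-- ===== VERDICT (by name: the statement is the Claim_ definition above) =====
theorem bfs_spec : Claim_equal_bfs := by
  unfold Claim_equal_bfs
  intro P hD hP
  unfold Spec_bfs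
  rw [bfs_alt_char P hP]
  by_cases h : Reach P (P.length - 1)
  · rw [(bfs_eq_reach P hP).1 h, if_pos (iterB_complete P hP _ h)]
  · rw [(bfs_eq_reach P hP).2 h,
      if_neg (show ¬((iterB P P.length).getD (P.length - 1) false = true) from
        fun ht => h (iterB_sound P hP _ _ ht))]
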